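-- pv_equiv track=rewrite | github.com/ll-Zomy-ll/ca_quest_terre | terre07.py | ca_isdigit
-- ===== SOURCE A (Python) =====
-- def ca_len(arg) -> int:
--     '''Return the length of the argument.'''
--     length: int = 0
--     for i in arg:
--         length += 1
--     return length
--
-- def ca_isdigit(arg: str) -> bool:
--     '''Return True if the argument is a whole number.'''
--     comma: int = 0
--     point: int = 0
--     if ((arg[0] == '-' and ca_len(arg) > 1) or (ord(arg[0]) >= 48
--          and ord(arg[0]) <= 57)):
--         for i in arg[1:]:
--             if (ord(i) < 44 or ord(i) > 57 or ord(i) == 47 or ord(i) == 45):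
--                 return False
--             if ord(i) == 44:
--                 comma += 1
--                 if comma > 1:
--                     return False
--             if ord(i) == 46:
--                 point += 1
--                 if point > 1:
--                     return False
--         return True
--     else:
--         return False
-- ===== SOURCE B (Python) =====
-- def ca_isdigit(arg: str) -> bool:
--     '''Return True if the argument is a whole number.'''
--     if not ((arg[0] == '-' and len(arg) > 1)
--             or ('0' <= arg[0] <= '9')):
--         return False
--     rest = arg[1:]
--     if not all(c in ',.0123456789' for c in rest):
--         return False
--     return rest.count(',') <= 1 and rest.count('.') <= 1
-- ===== Notes on version B (the rewrite author's own statement) =====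
-- stated objective: simpler
-- what changed: Replaces the fused early-returning scan with inline comma/point counters by a guard-clause decomposition: a membership pass over the tail against the literal allowed-character set, then two separate count passes checking that comma and point each occur at most once.
import Mathlib
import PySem

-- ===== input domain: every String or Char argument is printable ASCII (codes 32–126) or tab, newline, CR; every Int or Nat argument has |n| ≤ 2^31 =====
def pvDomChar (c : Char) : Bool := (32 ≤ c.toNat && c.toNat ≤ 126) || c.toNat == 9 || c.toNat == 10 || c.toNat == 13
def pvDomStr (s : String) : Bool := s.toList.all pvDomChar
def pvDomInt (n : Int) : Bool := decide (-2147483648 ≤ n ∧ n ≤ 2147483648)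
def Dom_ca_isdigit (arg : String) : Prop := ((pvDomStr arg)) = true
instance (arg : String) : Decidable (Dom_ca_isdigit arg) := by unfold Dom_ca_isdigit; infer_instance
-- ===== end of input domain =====

-- B replaces A's single fused early-returning scan with inline comma/point counters by a guard-clause
-- decomposition: one membership pass over arg[1:] plus two separate count passes (objective: simpler).

-- ===== PORT A =====
-- A's helper ca_len: a hand-written counting loop
def pvCaLen (l : List Char) : Int := l.foldl (fun n _ => n + 1) 0

-- A's for-loop over arg[1:] with its early returns, as structural recursion on the same state
def pvLoopA : List Char → Int → Int → Bool
  | [], _, _ => true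
  | i :: rest, comma, point =>
    if i.toNat < 44 || 57 < i.toNat || i.toNat == 47 || i.toNat == 45 then false
    else if i.toNat == 44 && decide (comma + 1 > 1) then false
    else if i.toNat == 46 && decide (point + 1 > 1) then false
    else pvLoopA rest (if i.toNat == 44 then comma + 1 else comma)
                      (if i.toNat == 46 then point + 1 else point)

def ca_isdigit (arg : String) : Bool :=
  match PySem.Str.pyGet? arg 0 with
  | none => false   -- arg[0] raises IndexError in Python; excluded by Pre_
  | some c0 =>
    if (c0 == '-' && decide (pvCaLen arg.toList > 1))
        || (decide (48 ≤ c0.toNat) && decide (c0.toNat ≤ 57)) then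
      pvLoopA (PySem.Chars.slice arg.toList (some 1) none) 0 0
    else false

-- ===== PORT B =====
def ca_isdigit_alt (arg : String) : Bool :=
  match PySem.Str.pyGet? arg 0 with
  | none => false   -- arg[0] raises IndexError in Python; excluded by Pre_
  | some c0 =>
    if !((c0 == '-' && decide (PySem.Str.len arg > 1))
          || (decide ('0' ≤ c0) && decide (c0 ≤ '9'))) then false
    else
      let rest := PySem.Chars.slice arg.toList (some 1) none
      if !(rest.all fun c => ",.0123456789".toList.contains c) then false
      else decide (rest.count ',' ≤ 1) && decide (rest.count '.' ≤ 1)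

-- ===== PRECONDITION & SPEC =====
-- Pre_ excludes only the empty string, on which A (and B alike) raise IndexError at arg[0].
def Pre_ca_isdigit (arg : String) : Prop := arg ≠ ""
instance (arg : String) : Decidable (Pre_ca_isdigit arg) := by unfold Pre_ca_isdigit; infer_instance
def pvWitness_ca_isdigit : String := "-12.5"

def Spec_ca_isdigit (arg : String) (out : Bool) : Prop := out = ca_isdigit_alt arg
instance (arg : String) (out : Bool) : Decidable (Spec_ca_isdigit arg out) := by unfold Spec_ca_isdigit; infer_instance

-- ===== CLAIM (what is proved, stated in full; the proofs are below) =====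
def Claim_equal_ca_isdigit : Prop := ∀ (arg : String), Dom_ca_isdigit arg → Pre_ca_isdigit arg → Spec_ca_isdigit arg (ca_isdigit arg)

-- ===== LEMMAS AND PROOFS =====
theorem pv_char_of_toNat (i : Char) (c : Char) (h : i.toNat = c.toNat) : i = c :=
  Char.ext (UInt32.toNat_inj.mp h)
theorem pv_mem_iff (i : Char) : (",.0123456789".toList.contains i)
    = decide (i.toNat = 44 ∨ i.toNat = 46 ∨ (48 ≤ i.toNat ∧ i.toNat ≤ 57)) := by
  have hset : ",.0123456789".toList = [',', '.', '0','1','2','3','4','5','6','7','8','9'] := by decide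
  rw [hset, Bool.eq_iff_iff]
  simp only [List.contains_eq_mem, List.mem_cons, List.not_mem_nil, or_false, decide_eq_true_eq]
  constructor
  · rintro (rfl|rfl|rfl|rfl|rfl|rfl|rfl|rfl|rfl|rfl|rfl|rfl) <;> decide
  · rintro (h | h | h)
    · exact Or.inl (pv_char_of_toNat i ',' h)
    · exact Or.inr (Or.inl (pv_char_of_toNat i '.' h))
    · have : i.toNat = 48 ∨ i.toNat = 49 ∨ i.toNat = 50 ∨ i.toNat = 51 ∨ i.toNat = 52 ∨
        i.toNat = 53 ∨ i.toNat = 54 ∨ i.toNat = 55 ∨ i.toNat = 56 ∨ i.toNat = 57 := by omega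
      rcases this with h|h|h|h|h|h|h|h|h|h
      · exact Or.inr (Or.inr (Or.inl (pv_char_of_toNat i '0' h)))
      · exact Or.inr (Or.inr (Or.inr (Or.inl (pv_char_of_toNat i '1' h))))
      · exact Or.inr (Or.inr (Or.inr (Or.inr (Or.inl (pv_char_of_toNat i '2' h)))))
      · exact Or.inr (Or.inr (Or.inr (Or.inr (Or.inr (Or.inl (pv_char_of_toNat i '3' h))))))
      · exact Or.inr (Or.inr (Or.inr (Or.inr (Or.inr (Or.inr (Or.inl (pv_char_of_toNat i '4' h)))))))
      · exact Or.inr (Or.inr (Or.inr (Or.inr (Or.inr (Or.inr (Or.inr (Or.inl (pv_char_of_toNat i '5' h))))))))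
      · exact Or.inr (Or.inr (Or.inr (Or.inr (Or.inr (Or.inr (Or.inr (Or.inr (Or.inl (pv_char_of_toNat i '6' h)))))))))
      · exact Or.inr (Or.inr (Or.inr (Or.inr (Or.inr (Or.inr (Or.inr (Or.inr (Or.inr (Or.inl (pv_char_of_toNat i '7' h))))))))))
      · exact Or.inr (Or.inr (Or.inr (Or.inr (Or.inr (Or.inr (Or.inr (Or.inr (Or.inr (Or.inr (Or.inl (pv_char_of_toNat i '8' h)))))))))))
      · exact Or.inr (Or.inr (Or.inr (Or.inr (Or.inr (Or.inr (Or.inr (Or.inr (Or.inr (Or.inr (Or.inr (pv_char_of_toNat i '9' h)))))))))))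
theorem pv_bad_eq_not_ok (i : Char) :
    (i.toNat < 44 || 57 < i.toNat || i.toNat == 47 || i.toNat == 45)
      = !(",.0123456789".toList.contains i) := by
  rw [pv_mem_iff, Bool.eq_iff_iff]
  simp only [Bool.or_eq_true, decide_eq_true_eq, beq_iff_eq, Bool.not_eq_true',
    decide_eq_false_iff_not]
  omega
theorem pv_bool_chain {X : Bool} {P Q P' Q' : Prop} [Decidable P] [Decidable Q]
    [Decidable P'] [Decidable Q'] (hP : P ↔ P') (hQ : Q ↔ Q') :
    (X && decide P && decide Q) = (X && decide P' && decide Q') := by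
  rw [decide_eq_decide.mpr hP, decide_eq_decide.mpr hQ]

theorem pv_loopA_eq (l : List Char) : ∀ (c p : Int), 0 ≤ c ∧ c ≤ 1 → 0 ≤ p ∧ p ≤ 1 →
    pvLoopA l c p = ((l.all fun ch => ",.0123456789".toList.contains ch)
      && decide (c + l.count ',' ≤ 1) && decide (p + l.count '.' ≤ 1)) := by
  induction l with
  | nil =>
    intro c p hc hp
    simp only [pvLoopA, List.all_nil, List.count_nil, Bool.true_and]
    simp only [Nat.cast_zero, add_zero]
    rw [decide_eq_true (by omega : c ≤ 1), decide_eq_true (by omega : p ≤ 1)]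
    rfl
  | cons i rest ih =>
    intro c p hc hp
    rw [pvLoopA, pv_bad_eq_not_ok, List.all_cons]
    by_cases hok : (",.0123456789".toList.contains i) = true
    · rw [hok]
      simp only [Bool.not_true, Bool.false_eq_true, if_false, Bool.true_and]
      have h44 : (i.toNat == 44) = (i == ',') := by
        rw [Bool.eq_iff_iff]; simp only [beq_iff_eq]
        exact ⟨fun h => pv_char_of_toNat i ',' h, fun h => by subst h; rfl⟩
      have h46 : (i.toNat == 46) = (i == '.') := by
        rw [Bool.eq_iff_iff]; simp only [beq_iff_eq]
        exact ⟨fun h => pv_char_of_toNat i '.' h, fun h => by subst h; rfl⟩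
      rw [h44, h46]
      by_cases e44 : i = ','
      · subst e44
        rw [List.count_cons_self, List.count_cons_of_ne (by decide : (',' : Char) ≠ '.')]
        simp only [(by decide : ((',' : Char) == ',') = true),
          (by decide : ((',' : Char) == '.') = false), Bool.true_and, Bool.false_and,
          Bool.false_eq_true, if_false, if_true]
        by_cases hgt : c + 1 > 1
        · rw [if_pos (by simpa using hgt),
            decide_eq_false (by push_cast; omega : ¬ (c + ((List.count ',' rest + 1 : Nat) : Int) ≤ 1))]
          simp
        · rw [if_neg (by simpa using hgt), ih (c + 1) p (by omega) hp]
          exact pv_bool_chain (by push_cast; omega) Iff.rfl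
      · have b44 : (i == ',') = false := beq_eq_false_iff_ne.mpr e44
        rw [b44, List.count_cons_of_ne e44]
        simp only [Bool.false_and, Bool.false_eq_true, if_false]
        by_cases e46 : i = '.'
        · subst e46
          rw [List.count_cons_self]
          simp only [(by decide : (('.' : Char) == '.') = true), Bool.true_and, if_true]
          by_cases hgt : p + 1 > 1
          · rw [if_pos (by simpa using hgt),
              decide_eq_false (by push_cast; omega : ¬ (p + ((List.count '.' rest + 1 : Nat) : Int) ≤ 1))]
            simp
          · rw [if_neg (by simpa using hgt), ih c (p + 1) hc (by omega)]
            exact pv_bool_chain Iff.rfl (by push_cast; omega)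
        · have b46 : (i == '.') = false := beq_eq_false_iff_ne.mpr e46
          rw [b46, List.count_cons_of_ne e46]
          simp only [Bool.false_and, Bool.false_eq_true, if_false]
          exact ih c p hc hp
    · rw [Bool.not_eq_true] at hok
      rw [hok]
      simp only [Bool.not_false, if_true, Bool.false_and]

theorem pv_caLen_eq (l : List Char) : pvCaLen l = l.length := by
  suffices h : ∀ (c : Int), l.foldl (fun n _ => n + 1) c = c + l.length by
    simpa [pvCaLen] using h 0
  induction l with
  | nil => intro c; simp
  | cons x xs ih => intro c; simp only [List.foldl_cons, List.length_cons, ih]; push_cast; omega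

theorem pv_guard_eq (c0 : Char) (arg : String) :
    ((c0 == '-' && decide (pvCaLen arg.toList > 1))
      || (decide (48 ≤ c0.toNat) && decide (c0.toNat ≤ 57)))
    = ((c0 == '-' && decide (PySem.Str.len arg > 1))
      || (decide ('0' ≤ c0) && decide (c0 ≤ '9'))) := by
  have h1 : decide (pvCaLen arg.toList > 1) = decide (PySem.Str.len arg > 1) := by
    rw [pv_caLen_eq, PySem.Str.len_eq]
  have h2 : decide (48 ≤ c0.toNat) = decide ('0' ≤ c0) := by
    simp [Char.le_def, UInt32.le_iff_toNat_le]
  have h3 : decide (c0.toNat ≤ 57) = decide (c0 ≤ '9') := by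
    simp [Char.le_def, UInt32.le_iff_toNat_le]
  rw [h1, h2, h3]

-- ===== VERDICT (by name: the statement is the Claim_ definition above) =====
theorem ca_isdigit_spec : Claim_equal_ca_isdigit := by
  intro arg _ _
  unfold Spec_ca_isdigit ca_isdigit ca_isdigit_alt
  cases h : PySem.Str.pyGet? arg 0 with
  | none => rfl
  | some c0 =>
    dsimp only
    rw [pv_guard_eq c0 arg]
    by_cases hg : ((c0 == '-' && decide (PySem.Str.len arg > 1))
        || (decide ('0' ≤ c0) && decide (c0 ≤ '9'))) = true
    · rw [hg]
      simp only [Bool.not_true, Bool.false_eq_true, if_false, if_true]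
      rw [pv_loopA_eq _ 0 0 (by omega) (by omega)]
      by_cases hall : ((PySem.Chars.slice arg.toList (some 1) none).all
          fun ch => ",.0123456789".toList.contains ch) = true
      · rw [hall]
        simp only [Bool.not_true, Bool.false_eq_true, if_false, Bool.true_and]
        rw [decide_eq_decide.mpr (by omega :
            ((0:Int) + ((PySem.Chars.slice arg.toList (some 1) none).count ',' : Int) ≤ 1)
              ↔ ((PySem.Chars.slice arg.toList (some 1) none).count ',' ≤ 1)),
          decide_eq_decide.mpr (by omega :
            ((0:Int) + ((PySem.Chars.slice arg.toList (some 1) none).count '.' : Int) ≤ 1)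
              ↔ ((PySem.Chars.slice arg.toList (some 1) none).count '.' ≤ 1))]
      · rw [Bool.not_eq_true] at hall
        rw [hall]
        simp only [Bool.not_false, if_true, Bool.false_and]
    · rw [Bool.not_eq_true] at hg
      rw [hg]
      simp only [Bool.false_eq_true, if_false, Bool.not_false, if_true]
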